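-- pv_equiv track=rewrite | github.com/gboned/Refactorizar | yatzy.py | smallStraight
-- ===== SOURCE A (Python) =====
-- def smallStraight(*dice):
--     num = []
--     i = 1
--     for d in range(0, len(dice) + 1):
--         if i in dice and i <= 5:
--             num.append(i)
--             i = i + 1
--         elif len(num) < 5:
--             return 0
--     return sum(num)
-- ===== SOURCE B (Python) =====
-- def smallStraight(*dice):
--     return 15 if all(v in dice for v in (1, 2, 3, 4, 5)) else 0
-- ===== Notes on version B (the rewrite author's own statement) =====
-- stated objective: simpler
-- what changed: Replaced the stateful counter walk (list accumulator, fuel loop over range(len+1), early return, final sum) by a single containment test: all five required values 1..5 are among the dice, returning the constant 15 or 0.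
import Mathlib
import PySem

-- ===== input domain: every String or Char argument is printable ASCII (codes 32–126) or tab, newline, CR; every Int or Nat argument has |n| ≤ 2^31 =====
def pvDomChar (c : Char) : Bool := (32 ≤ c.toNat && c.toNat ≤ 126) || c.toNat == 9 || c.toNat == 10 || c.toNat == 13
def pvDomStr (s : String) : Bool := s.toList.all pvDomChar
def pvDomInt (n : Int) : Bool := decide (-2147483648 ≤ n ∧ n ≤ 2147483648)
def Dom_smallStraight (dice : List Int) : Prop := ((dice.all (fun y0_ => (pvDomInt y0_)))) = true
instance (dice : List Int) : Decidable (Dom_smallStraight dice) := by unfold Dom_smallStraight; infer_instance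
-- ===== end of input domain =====

-- B replaces A's counter-walk (list accumulator, early return, sum) by a single
-- set-containment test returning the constant 15 or 0 (objective: simpler).

-- ===== PORT A =====
-- the for-loop over range(0, len(dice)+1) with its early 'return 0', as structural
-- recursion over the range list with state (num, i)
def smallStraightGo (dice : List Int) : List Int → List Int → Int → Int
  | [], num, _ => num.sum
  | _ :: ds, num, i =>
    if i ∈ dice ∧ i ≤ 5 then
      smallStraightGo dice ds (num ++ [i]) (i + 1)
    else if num.length < 5 then 0
    else smallStraightGo dice ds num i

def smallStraight (dice : List Int) : Int :=
  smallStraightGo dice (PySem.List.pyRange 0 ((dice.length : Int) + 1) 1) [] 1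

-- ===== PORT B =====
def smallStraight_alt (dice : List Int) : Int :=
  if [(1 : Int), 2, 3, 4, 5].all (fun v => decide (v ∈ dice)) then 15 else 0

-- ===== PRECONDITION & SPEC =====
def Spec_smallStraight (dice : List Int) (out : Int) : Prop := out = smallStraight_alt dice
instance (dice : List Int) (out : Int) : Decidable (Spec_smallStraight dice out) := by unfold Spec_smallStraight; infer_instance

-- ===== CLAIM (what is proved, stated in full; the proofs are below) =====
def Claim_equal_smallStraight : Prop := ∀ (dice : List Int), Dom_smallStraight dice → Spec_smallStraight dice (smallStraight dice)

-- ===== LEMMAS AND PROOFS =====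

-- invariant characterisation of A's loop: after j successful appends the state is
-- num = [1,…,j], i = j+1, and (while j < 5) exactly j+fuel.length = len+1 fuel remains
theorem smallStraightGo_eq (dice : List Int) :
    ∀ (fuel : List Int) (j : Nat), j ≤ 5 →
      (j < 5 → j + fuel.length = dice.length + 1) →
      (∀ v ∈ List.range' 1 j, (Int.ofNat v) ∈ dice) →
      smallStraightGo dice fuel ((List.range' 1 j).map Int.ofNat) ((Int.ofNat j) + 1) =
        (if (List.range' (j + 1) (5 - j)).all (fun v => decide ((Int.ofNat v) ∈ dice)) then 15 else 0) := by
  intro fuel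
  induction fuel with
  | nil =>
    intro j hj5 hlen hsub
    -- the loop can only run out of fuel with j = 5
    have hj : j = 5 := by
      by_contra hne
      have hlt : j < 5 := lt_of_le_of_ne hj5 hne
      have hL : j = dice.length + 1 := by simpa using hlen hlt
      -- [1,…,j] is a nodup list of j integers inside dice, so j ≤ dice.length
      have hnd : ((List.range' 1 j).map Int.ofNat).Nodup :=
        (List.nodup_range' (s := 1) (n := j)).map (fun a b h => Int.ofNat.inj h)
      have hss : ((List.range' 1 j).map Int.ofNat) ⊆ dice := by
        intro x hx
        rcases List.mem_map.1 hx with ⟨v, hv, rfl⟩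
        exact hsub v hv
      have := (hnd.subperm hss).length_le
      simp at this
      omega
    subst hj
    show (((List.range' 1 5).map Int.ofNat).sum) = _
    norm_num [List.range']
  | cons t ds ih =>
    intro j hj5 hlen hsub
    rcases lt_or_eq_of_le hj5 with hjlt | hje
    · -- j < 5 : the current i = j+1 is ≤ 5
      by_cases hmem : ((Int.ofNat j) + 1) ∈ dice
      · -- append branch: recurse with j+1
        have hcond : ((Int.ofNat j) + 1) ∈ dice ∧ (Int.ofNat j) + 1 ≤ 5 :=
          ⟨hmem, by simp [Int.ofNat_eq_natCast]; exact_mod_cast by omega⟩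
        rw [smallStraightGo, if_pos hcond]
        have hstep : (List.range' 1 j).map Int.ofNat ++ [(Int.ofNat j) + 1] =
            (List.range' 1 (j + 1)).map Int.ofNat := by
          rw [List.range'_1_concat, List.map_append]
          simp [Int.ofNat_eq_natCast]
          ring
        rw [hstep]
        have hrec := ih (j + 1) (by omega)
          (fun h => by simp at hlen ⊢; omega)
          (by
            intro v hv
            rw [List.range'_1_concat] at hv
            rcases List.mem_append.1 hv with h | h
            · exact hsub v h
            · simp at h
              subst h
              simpa [Int.ofNat_eq_natCast, add_comm] using hmem)
        have hcast : (Int.ofNat j) + 1 + 1 = (Int.ofNat (j + 1)) + 1 := by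
          simp [Int.ofNat_eq_natCast]
        rw [hcast, hrec]
        -- the two all-conditions agree because the die j+1 is present
        have hrange : List.range' (j + 1) (5 - j) = (j + 1) :: List.range' (j + 2) (5 - (j + 1)) := by
          have h5 : 5 - j = (5 - (j + 1)) + 1 := by omega
          rw [h5, List.range'_succ]
        have hdec : decide ((Int.ofNat (j + 1)) ∈ dice) = true :=
          decide_eq_true (by simpa [Int.ofNat_eq_natCast] using hmem)
        rw [hrange, List.all_cons, hdec, Bool.true_and]
      · -- missing die: early 'return 0'
        have hcond : ¬ (((Int.ofNat j) + 1) ∈ dice ∧ (Int.ofNat j) + 1 ≤ 5) := fun h => hmem h.1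
        rw [smallStraightGo, if_neg hcond, if_pos (by simpa using hjlt)]
        have hrange : List.range' (j + 1) (5 - j) = (j + 1) :: List.range' (j + 2) (5 - (j + 1)) := by
          have h5 : 5 - j = (5 - (j + 1)) + 1 := by omega
          rw [h5, List.range'_succ]
        have hdec : decide ((Int.ofNat (j + 1)) ∈ dice) = false :=
          decide_eq_false (by simpa [Int.ofNat_eq_natCast] using hmem)
        rw [hrange, List.all_cons, hdec]
        simp
    · -- j = 5 : i = 6, the pass branch, recurse with the same state
      subst hje
      have hcond : ¬ ((Int.ofNat 5) + 1 ∈ dice ∧ (Int.ofNat 5) + 1 ≤ 5) := by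
        intro h
        have := h.2
        simp [Int.ofNat_eq_natCast] at this
      rw [smallStraightGo, if_neg hcond, if_neg (by simp [List.range'])]
      exact ih 5 le_rfl (by omega) hsub

-- ===== VERDICT (by name: the statement is the Claim_ definition above) =====
theorem smallStraight_spec : Claim_equal_smallStraight := by
  unfold Claim_equal_smallStraight
  intro dice _
  unfold Spec_smallStraight smallStraight smallStraight_alt
  have h0 : smallStraightGo dice (PySem.List.pyRange 0 ((dice.length : Int) + 1) 1) [] 1 =
      (if (List.range' 1 5).all (fun v => decide ((Int.ofNat v) ∈ dice)) then 15 else 0) := by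
    have hlen : (PySem.List.pyRange 0 ((dice.length : Int) + 1) 1).length = dice.length + 1 := by
      rw [PySem.List.length_pyRange_one]
      omega
    exact smallStraightGo_eq dice (PySem.List.pyRange 0 ((dice.length : Int) + 1) 1)
      0 (by omega) (fun _ => by rw [hlen]; omega) (fun v hv => by simp [List.range'] at hv)
  rw [h0]
  have hiff : ((List.range' 1 5).all (fun v => decide ((Int.ofNat v) ∈ dice)) = true) ↔
      ([(1 : Int), 2, 3, 4, 5].all (fun v => decide (v ∈ dice)) = true) := by
    have hr : List.range' 1 5 = [1, 2, 3, 4, 5] := rfl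
    rw [hr]
    simp [Int.ofNat_eq_natCast]
  by_cases hB : [(1 : Int), 2, 3, 4, 5].all (fun v => decide (v ∈ dice)) = true
  · rw [if_pos (hiff.2 hB), if_pos hB]
  · rw [if_neg (fun h => hB (hiff.1 h)), if_neg hB]
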